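-- pv_equiv track=rewrite | github.com/meelgroup/manthan | checkSkolem.py | _wrap_commas
-- ===== SOURCE A (Python) =====
-- def _wrap_commas(prefix, args, suffix=";\n", indent="  ", max_len=200):
--     if not args:
--         return prefix + "()" + suffix
--     current = prefix + "(" + args[0]
--     lines = []
--     for arg in args[1:]:
--         if len(current) + 2 + len(arg) > max_len:
--             lines.append(current + ",")
--             current = indent + arg
--         else:
--             current += ", " + arg
--     lines.append(current + ")" + suffix)
--     return "\n".join(lines)
-- ===== SOURCE B (Python) =====
-- def _wrap_commas(prefix, args, suffix=";\n", indent="  ", max_len=200):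
--     if not args:
--         return prefix + "()" + suffix
--     # explicit stack of pending args (top = end); outer loop emits one line per
--     # iteration, inner loop pops as many further args as still fit on that line
--     stack = list(reversed(args))
--     out = []
--     head = prefix + "("
--     while stack:
--         first = stack.pop()
--         width = len(head) + len(first)
--         group = [first]
--         while stack and width + 2 + len(stack[-1]) <= max_len:
--             a = stack.pop()
--             width += 2 + len(a)
--             group.append(a)
--         out.append(head + ", ".join(group))
--         head = indent
--     return ",\n".join(out) + ")" + suffix
-- ===== Notes on version B (the rewrite author's own statement) =====
-- stated objective: alternative
-- what changed: Replaced A's single per-arg fold that grows a 'current' string and a lines list by an explicit-stack line-at-a-time algorithm: reverse the args onto a stack, and per output line pop the first arg then pop further args while they fit (tracking only an integer width), rendering each whole line with one ', '.join and joining lines with ',\n'.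
import Mathlib
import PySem

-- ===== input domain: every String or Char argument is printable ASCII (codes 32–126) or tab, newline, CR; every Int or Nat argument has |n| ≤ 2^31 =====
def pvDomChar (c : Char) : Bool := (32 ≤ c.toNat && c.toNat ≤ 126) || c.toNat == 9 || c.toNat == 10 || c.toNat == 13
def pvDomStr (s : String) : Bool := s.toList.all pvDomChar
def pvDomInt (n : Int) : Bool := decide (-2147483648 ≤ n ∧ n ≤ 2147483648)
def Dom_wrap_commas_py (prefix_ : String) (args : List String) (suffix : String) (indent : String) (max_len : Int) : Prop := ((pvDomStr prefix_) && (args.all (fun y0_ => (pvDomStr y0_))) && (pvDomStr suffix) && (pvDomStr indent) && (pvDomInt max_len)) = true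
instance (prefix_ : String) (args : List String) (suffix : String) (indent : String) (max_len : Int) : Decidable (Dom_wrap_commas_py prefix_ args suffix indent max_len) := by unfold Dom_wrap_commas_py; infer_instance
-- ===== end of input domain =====

-- B replaces A's per-arg fold that grows a 'current' string by an explicit-stack,
-- line-at-a-time algorithm: per output line, pop the first arg, then pop further args
-- while they fit (tracking only an integer width), and render the line with one join
-- (objective: alternative).

-- ===== PORT A =====
-- loop body of A's for-loop, on the state (lines, current)
def pvStepA (indent : String) (max_len : Int) (st : List String × String) (arg : String) : List String × String :=
  if PySem.Str.len st.2 + 2 + PySem.Str.len arg > max_len then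
    (st.1 ++ [st.2 ++ ","], indent ++ arg)
  else
    (st.1, st.2 ++ ", " ++ arg)

def wrap_commas_py (prefix_ : String) (args : List String) (suffix : String) (indent : String) (max_len : Int) : String :=
  match args with
  | [] => prefix_ ++ "()" ++ suffix
  | a0 :: rest =>
    let st := rest.foldl (pvStepA indent max_len) ([], prefix_ ++ "(" ++ a0)
    PySem.Str.join "\n" (st.1 ++ [st.2 ++ ")" ++ suffix])

-- ===== PORT B =====
-- B's inner while loop: pop args off the stack while they still fit on a line already
-- `width` wide; returns (the popped group, the remaining stack).  The Python stack is
-- list(reversed(args)) popped from the END, i.e. it yields the args in order: it is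
-- represented here as the remaining args in order, consumed from the front (exact).
def pvSplitLine (max_len : Int) : Int → List String → List String × List String
  | _, [] => ([], [])
  | width, a :: stack =>
    if width + 2 + PySem.Str.len a ≤ max_len then
      let p := pvSplitLine max_len (width + 2 + PySem.Str.len a) stack
      (a :: p.1, p.2)
    else ([], a :: stack)

theorem pvSplitLine_snd_le (max_len : Int) :
    ∀ (w : Int) (l : List String), (pvSplitLine max_len w l).2.length ≤ l.length := by
  intro w l
  induction l generalizing w with
  | nil => simp [pvSplitLine]
  | cons a stack ih =>
    simp only [pvSplitLine]
    split
    · exact le_trans (ih _) (Nat.le_succ _)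
    · simp

-- B's outer while loop: one output line per iteration
def pvLines (indent : String) (max_len : Int) : String → List String → List String
  | _, [] => []
  | head, first :: stack =>
    let p := pvSplitLine max_len (PySem.Str.len head + PySem.Str.len first) stack
    (head ++ PySem.Str.join ", " (first :: p.1)) :: pvLines indent max_len indent p.2
termination_by _ l => l.length
decreasing_by
  simpa [Nat.lt_succ_iff] using pvSplitLine_snd_le max_len _ stack

def wrap_commas_py_alt (prefix_ : String) (args : List String) (suffix : String) (indent : String) (max_len : Int) : String :=
  match args with
  | [] => prefix_ ++ "()" ++ suffix
  | _ :: _ =>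
    PySem.Str.join ",\n" (pvLines indent max_len (prefix_ ++ "(") args) ++ ")" ++ suffix

-- ===== PRECONDITION & SPEC =====
def Spec_wrap_commas_py (prefix_ : String) (args : List String) (suffix : String) (indent : String) (max_len : Int) (out : String) : Prop := out = wrap_commas_py_alt prefix_ args suffix indent max_len
instance (prefix_ : String) (args : List String) (suffix : String) (indent : String) (max_len : Int) (out : String) : Decidable (Spec_wrap_commas_py prefix_ args suffix indent max_len out) := by unfold Spec_wrap_commas_py; infer_instance

-- ===== CLAIM (what is proved, stated in full; the proofs are below) =====
def Claim_equal_wrap_commas_py : Prop := ∀ (prefix_ : String) (args : List String) (suffix : String) (indent : String) (max_len : Int), Dom_wrap_commas_py prefix_ args suffix indent max_len → Spec_wrap_commas_py prefix_ args suffix indent max_len (wrap_commas_py prefix_ args suffix indent max_len)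

-- ===== LEMMAS AND PROOFS =====

theorem pvJoin_singleton (sep a : String) : PySem.Str.join sep [a] = a := by
  rw [← String.toList_inj, PySem.Str.toList_join]
  simp [PySem.Chars.join_singleton]

theorem pvJoin_cons (sep a : String) (t : List String) (h : t ≠ []) :
    PySem.Str.join sep (a :: t) = a ++ sep ++ PySem.Str.join sep t := by
  cases t with
  | nil => exact absurd rfl h
  | cons b t =>
    rw [← String.toList_inj, PySem.Str.toList_join]
    simp [PySem.Chars.join_cons_cons, PySem.Str.toList_join]

theorem pvJoin_append_singleton (sep a : String) (g : List String) (h : g ≠ []) :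
    PySem.Str.join sep (g ++ [a]) = PySem.Str.join sep g ++ sep ++ a := by
  induction g with
  | nil => exact absurd rfl h
  | cons x g ih =>
    cases g with
    | nil => simp [pvJoin_singleton, pvJoin_cons, String.append_assoc]
    | cons y t =>
      rw [List.cons_append, pvJoin_cons _ _ _ (by simp), ih (by simp),
        pvJoin_cons sep x (y :: t) (by simp)]
      simp [String.append_assoc]

-- A's fold over 'rest', started on a line whose rendered group is 'grp', runs exactly
-- like one pvSplitLine step of B followed (on a break) by the fold on the leftover stack.
theorem pvFoldA_split (indent head : String) (max_len : Int) :
    ∀ (rest lines : List String) (grp g q : List String), grp ≠ [] →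
      pvSplitLine max_len (PySem.Str.len (head ++ PySem.Str.join ", " grp)) rest = (g, q) →
      List.foldl (pvStepA indent max_len) (lines, head ++ PySem.Str.join ", " grp) rest =
        (match q with
         | [] => (lines, head ++ PySem.Str.join ", " (grp ++ g))
         | b :: r => List.foldl (pvStepA indent max_len)
             (lines ++ [head ++ PySem.Str.join ", " (grp ++ g) ++ ","], indent ++ b) r) := by
  intro rest
  induction rest with
  | nil =>
    intro lines grp g q h hsp
    simp only [pvSplitLine, Prod.mk.injEq] at hsp
    obtain ⟨rfl, rfl⟩ := hsp
    simp
  | cons b rest ih =>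
    intro lines grp g q h hsp
    by_cases hc : PySem.Str.len (head ++ PySem.Str.join ", " grp) + 2 + PySem.Str.len b ≤ max_len
    · have hgrow : head ++ PySem.Str.join ", " grp ++ ", " ++ b
          = head ++ PySem.Str.join ", " (grp ++ [b]) := by
        rw [pvJoin_append_singleton _ _ _ h]
        simp [String.append_assoc]
      have hlen : PySem.Str.len (head ++ PySem.Str.join ", " grp) + 2 + PySem.Str.len b
          = PySem.Str.len (head ++ PySem.Str.join ", " (grp ++ [b])) := by
        rw [← hgrow]
        simp [PySem.Str.len_eq]
        omega
      have hstep : pvStepA indent max_len (lines, head ++ PySem.Str.join ", " grp) b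
          = (lines, head ++ PySem.Str.join ", " (grp ++ [b])) := by
        simp only [pvStepA]
        rw [if_neg (by omega), hgrow]
      rw [pvSplitLine, if_pos hc, hlen] at hsp
      rcases hq' : pvSplitLine max_len
          (PySem.Str.len (head ++ PySem.Str.join ", " (grp ++ [b]))) rest with ⟨g', q'⟩
      rw [hq'] at hsp
      simp only [Prod.mk.injEq] at hsp
      obtain ⟨rfl, rfl⟩ := hsp
      rw [List.foldl_cons, hstep, ih _ (grp ++ [b]) g' q' (by simp) hq']
      simp only [List.append_assoc, List.singleton_append]
    · have hstep : pvStepA indent max_len (lines, head ++ PySem.Str.join ", " grp) b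
          = (lines ++ [head ++ PySem.Str.join ", " grp ++ ","], indent ++ b) := by
        simp only [pvStepA]
        rw [if_pos (by omega)]
      rw [pvSplitLine, if_neg hc] at hsp
      simp only [Prod.mk.injEq] at hsp
      obtain ⟨rfl, rfl⟩ := hsp
      rw [List.foldl_cons, hstep]
      simp

-- main invariant: A's fold produces exactly B's lines (all but the last suffixed with ",")
theorem pvMain (indent : String) (max_len : Int) :
    ∀ (n : ℕ) (first : String) (stack : List String), stack.length ≤ n →
      ∀ (head : String) (lines : List String),
      ∃ L last, pvLines indent max_len head (first :: stack) = L ++ [last] ∧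
        List.foldl (pvStepA indent max_len) (lines, head ++ first) stack
          = (lines ++ L.map (· ++ ",") , last) := by
  intro n
  induction n with
  | zero =>
    intro first stack hn head lines
    have : stack = [] := List.length_eq_zero_iff.mp (Nat.le_zero.mp hn)
    subst this
    refine ⟨[], head ++ first, ?_, by simp⟩
    simp [pvLines, pvSplitLine, pvJoin_singleton]
  | succ n ih =>
    intro first stack hn head lines
    have hwidth : PySem.Str.len head + PySem.Str.len first = PySem.Str.len (head ++ first) := by
      simp [PySem.Str.len_eq]
    rcases hsp : pvSplitLine max_len (PySem.Str.len (head ++ first)) stack with ⟨g, q⟩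
    have hsp' : pvSplitLine max_len
        (PySem.Str.len (head ++ PySem.Str.join ", " [first])) stack = (g, q) := by
      rw [pvJoin_singleton]; exact hsp
    have hfold := pvFoldA_split indent head max_len stack lines [first] g q (by simp) hsp'
    rw [pvJoin_singleton] at hfold
    have hlines : pvLines indent max_len head (first :: stack)
        = (head ++ PySem.Str.join ", " (first :: g)) :: pvLines indent max_len indent q := by
      rw [pvLines, hwidth, hsp]
    cases q with
    | nil =>
      refine ⟨[], head ++ PySem.Str.join ", " (first :: g), ?_, ?_⟩
      · rw [hlines]; simp [pvLines]
      · rw [hfold]; simp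
    | cons b r =>
      have hr : r.length ≤ n := by
        have hle := pvSplitLine_snd_le max_len (PySem.Str.len (head ++ first)) stack
        rw [hsp] at hle
        simp at hle
        omega
      obtain ⟨L', last', hL', hfold'⟩ :=
        ih b r hr indent (lines ++ [head ++ PySem.Str.join ", " (first :: g) ++ ","])
      refine ⟨(head ++ PySem.Str.join ", " (first :: g)) :: L', last', ?_, ?_⟩
      · rw [hlines, hL']; simp
      · rw [hfold]
        simp only [List.singleton_append]
        rw [hfold']
        simp

-- joining A's comma-suffixed lines with "\n" = joining the raw lines with ",\n"
theorem pvJoin_commas (suffix : String) :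
    ∀ (ls : List String) (l : String),
      PySem.Str.join "\n" (ls.map (· ++ ",") ++ [l ++ ")" ++ suffix])
        = PySem.Str.join ",\n" (ls ++ [l]) ++ ")" ++ suffix := by
  intro ls
  induction ls with
  | nil => intro l; simp [pvJoin_singleton]
  | cons x ls ih =>
    intro l
    rw [List.map_cons, List.cons_append, List.cons_append,
      pvJoin_cons _ _ _ (by simp), pvJoin_cons _ _ _ (by simp), ih]
    have h3 : x ++ "," ++ "\n" = x ++ ",\n" := by
      rw [String.append_assoc]
      exact congrArg (x ++ ·) (by decide)
    simp only [← String.append_assoc]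
    rw [h3]

-- ===== VERDICT (by name: the statement is the Claim_ definition above) =====
theorem wrap_commas_py_spec : Claim_equal_wrap_commas_py := by
  intro prefix_ args suffix indent max_len _
  unfold Spec_wrap_commas_py wrap_commas_py wrap_commas_py_alt
  cases args with
  | nil => rfl
  | cons a0 rest =>
    simp only
    obtain ⟨L, last, hL, hfold⟩ :=
      pvMain indent max_len rest.length a0 rest le_rfl (prefix_ ++ "(") []
    rw [hfold, hL]
    simpa using pvJoin_commas suffix L last
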